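-- pv_equiv track=rewrite | github.com/ivi982010/SySdL-TPs | Lexer.py | a_ParClose
-- ===== SOURCE A (Python) =====
-- def a_ParClose (tokens, acu):
--     s = 0
--     for c in acu:
--         if c == ')':
--             s = 1
--         else:
--             s = -1
--     if s == 1:
--         tokens.append(("<ParClose>", acu))
--     return (s == 1)
-- ===== SOURCE B (Python) =====
-- def a_ParClose(tokens, acu):
--     if acu.endswith(')'):
--         tokens.append(("<ParClose>", acu))
--         return True
--     return False
-- ===== Notes on version B (the rewrite author's own statement) =====
-- stated objective: faster
-- what changed: Replaces the per-character flag-overwriting loop with a single endswith(')') suffix test, so only the last character is examined.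
import Mathlib
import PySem

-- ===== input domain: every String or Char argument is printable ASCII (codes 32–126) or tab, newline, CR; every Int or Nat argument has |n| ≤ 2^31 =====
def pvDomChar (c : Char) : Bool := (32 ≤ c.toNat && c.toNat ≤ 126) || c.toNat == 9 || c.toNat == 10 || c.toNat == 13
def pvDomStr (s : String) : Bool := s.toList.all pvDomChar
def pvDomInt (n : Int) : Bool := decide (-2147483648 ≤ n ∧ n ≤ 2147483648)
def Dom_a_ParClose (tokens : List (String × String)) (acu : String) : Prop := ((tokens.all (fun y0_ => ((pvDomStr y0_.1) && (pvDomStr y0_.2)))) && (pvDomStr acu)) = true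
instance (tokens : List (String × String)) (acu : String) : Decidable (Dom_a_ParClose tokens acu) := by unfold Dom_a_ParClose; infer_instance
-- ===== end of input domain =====

-- B replaces A's per-character flag-overwriting loop with one endswith(')') suffix test (idiomatic).
-- Both A and B append ("<ParClose>", acu) to tokens exactly when they return True; the theorems here
-- are about the returned Bool only.

-- ===== PORT A =====
-- the loop: s starts at 0 and is overwritten for every character
def a_ParClose (tokens : List (String × String)) (acu : String) : Bool :=
  let s : Int := acu.toList.foldl (fun s c => if c = ')' then (1 : Int) else -1) 0
  -- (if s = 1 then tokens.append …) — mutation of tokens, not part of the return value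
  decide (s = 1)

-- ===== PORT B =====
def a_ParClose_alt (tokens : List (String × String)) (acu : String) : Bool :=
  PySem.Str.endswith acu ")"

-- ===== PRECONDITION & SPEC =====
def Spec_a_ParClose (tokens : List (String × String)) (acu : String) (out : Bool) : Prop := out = a_ParClose_alt tokens acu
instance (tokens : List (String × String)) (acu : String) (out : Bool) : Decidable (Spec_a_ParClose tokens acu out) := by unfold Spec_a_ParClose; infer_instance

-- ===== CLAIM (what is proved, stated in full; the proofs are below) =====
def Claim_equal_a_ParClose : Prop := ∀ (tokens : List (String × String)) (acu : String), Dom_a_ParClose tokens acu → Spec_a_ParClose tokens acu (a_ParClose tokens acu)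

-- ===== LEMMAS AND PROOFS =====

-- a one-element list is a suffix of l ++ [c] iff its element is c
theorem singleton_suffix_concat (x c : Char) (l : List Char) :
    ([x] <:+ l ++ [c]) ↔ x = c := by
  constructor
  · rintro ⟨t, ht⟩
    have := congrArg List.getLast? ht
    simpa using this
  · rintro rfl
    exact ⟨l, rfl⟩

-- the loop's flag equals the endswith test, for any list of characters
theorem loop_eq_endswith (l : List Char) :
    (decide ((l.foldl (fun s c => if c = ')' then (1 : Int) else -1) 0) = 1)) =
      PySem.Chars.endswith l [')'] := by
  induction l using List.reverseRecOn with
  | nil =>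
    have h : PySem.Chars.endswith ([] : List Char) [')'] = false := by decide
    simp [h]
  | append_singleton l c _ =>
    rw [List.foldl_append]
    by_cases hc : c = ')'
    · subst hc
      have h : PySem.Chars.endswith (l ++ [')']) [')'] = true :=
        (PySem.Chars.endswith_iff _ _).mpr ⟨l, rfl⟩
      simp [h]
    · have h : PySem.Chars.endswith (l ++ [c]) [')'] = false := by
        rw [Bool.eq_false_iff]
        intro hE
        exact hc ((singleton_suffix_concat ')' c l).mp ((PySem.Chars.endswith_iff _ _).mp hE)).symm
      simp [h, hc]

-- ===== VERDICT (by name: the statement is the Claim_ definition above) =====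
theorem a_ParClose_spec : Claim_equal_a_ParClose := by
  intro tokens acu _
  unfold Spec_a_ParClose a_ParClose a_ParClose_alt
  rw [PySem.Str.endswith_eq]
  exact loop_eq_endswith acu.toList
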